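-- pv_equiv track=rewrite | github.com/BhagyashreeBatra/bajaj_dev_challenge | backend - Copy/app.py | process_data
-- ===== SOURCE A (Python) =====
-- def process_data(data):
--     numbers = []
--     alphabets = []
--     highest_lowercase = None
--
--     for item in data:
--         if item.isdigit():
--             numbers.append(item)
--         elif item.isalpha():
--             alphabets.append(item)
--             if item.islower():
--                 if highest_lowercase is None or item > highest_lowercase:
--                     highest_lowercase = item
--     return numbers, alphabets, highest_lowercase
-- ===== SOURCE B (Python) =====
-- def process_data(data):
--     numbers = [item for item in data if item.isdigit()]
--     alphabets = [item for item in data if item.isalpha()]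
--     highest_lowercase = max((item for item in alphabets if item.islower()), default=None)
--     return numbers, alphabets, highest_lowercase
-- ===== Notes on version B (the rewrite author's own statement) =====
-- stated objective: idiomatic
-- what changed: One accumulating loop with manual running-max bookkeeping is replaced by three independent comprehension/filter scans and a closed-form max(..., default=None) over the lowercase alphabetic items (the redundant not-isdigit guard before isalpha is dropped).
import Mathlib
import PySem

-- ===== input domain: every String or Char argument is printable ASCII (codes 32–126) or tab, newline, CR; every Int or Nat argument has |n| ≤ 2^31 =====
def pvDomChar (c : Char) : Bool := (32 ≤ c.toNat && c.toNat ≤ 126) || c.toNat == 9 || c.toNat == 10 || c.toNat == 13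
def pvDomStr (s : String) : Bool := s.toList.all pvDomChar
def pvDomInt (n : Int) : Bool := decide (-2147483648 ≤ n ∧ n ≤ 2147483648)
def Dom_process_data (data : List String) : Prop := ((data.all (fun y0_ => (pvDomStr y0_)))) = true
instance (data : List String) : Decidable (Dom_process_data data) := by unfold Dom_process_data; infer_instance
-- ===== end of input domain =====

-- B is an idiomatic re-decomposition: three independent filter passes and a closed-form
-- max(..., default=None) replace A's single accumulating loop with running-max bookkeeping.

-- shared primitive port: Python str.islower (exact on ASCII, where the cased characters
-- are exactly the alphabetic ones): some cased character, and every cased one lowercase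
def pvStrIslower (s : String) : Bool :=
  s.toList.any PySem.Chars.isalpha &&
  s.toList.all (fun c => !(PySem.Chars.isalpha c) || PySem.Chars.islower c)

-- ===== PORT A =====
def process_data (data : List String) : List String × List String × Option String :=
  data.foldl
    (fun (acc : List String × List String × Option String) item =>
      if PySem.Str.strIsdigit item then (acc.1 ++ [item], acc.2.1, acc.2.2)
      else if PySem.Str.strIsalpha item then
        let alphabets := acc.2.1 ++ [item]
        let hl :=
          if pvStrIslower item then
            match acc.2.2 with
            | none => some item
            | some h => if h < item then some item else acc.2.2
          else acc.2.2
        (acc.1, alphabets, hl)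
      else acc)
    ([], [], none)

-- ===== PORT B =====
def process_data_alt (data : List String) : List String × List String × Option String :=
  let numbers := data.filter PySem.Str.strIsdigit
  let alphabets := data.filter PySem.Str.strIsalpha
  let highest_lowercase := PySem.List.max? (alphabets.filter pvStrIslower) (fun x => x)
  (numbers, alphabets, highest_lowercase)

-- ===== PRECONDITION & SPEC =====
def Spec_process_data (data : List String) (out : List String × List String × Option String) : Prop := out = process_data_alt data
instance (data : List String) (out : List String × List String × Option String) : Decidable (Spec_process_data data out) := by unfold Spec_process_data; infer_instance

-- ===== CLAIM (what is proved, stated in full; the proofs are below) =====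
def Claim_equal_process_data : Prop := ∀ (data : List String), Dom_process_data data → Spec_process_data data (process_data data)

-- ===== LEMMAS AND PROOFS =====

-- a nonempty all-alphabetic string is never all-digits
theorem not_digit_of_alpha (s : List Char) (h : PySem.Chars.strIsalpha s = true) :
    PySem.Chars.strIsdigit s = false := by
  simp only [PySem.Chars.strIsalpha, PySem.Chars.strIsdigit] at *
  cases s with
  | nil => simp at h
  | cons c t =>
    simp only [List.all_cons, List.isEmpty_cons, Bool.not_false, Bool.true_and,
      Bool.and_eq_true] at h ⊢
    have hc := h.1
    have hcd : PySem.Chars.isdigit c = false := by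
      simp only [PySem.Chars.isalpha, PySem.Chars.isupper, PySem.Chars.islower,
        PySem.Chars.isdigit, Bool.or_eq_true, Bool.and_eq_true, decide_eq_true_eq] at hc ⊢
      rcases hc with h' | h' <;>
      · have hne : ¬ c ≤ '9' := fun hle => by
          have := le_trans h'.1 hle; revert this; decide
        simp [hne]
    simp [hcd]

-- loop invariant: A's fold over any prefix, from any accumulator
theorem loop_inv (l : List String) (ns as : List String) (hl : Option String) :
    l.foldl
      (fun (acc : List String × List String × Option String) item =>
        if PySem.Str.strIsdigit item then (acc.1 ++ [item], acc.2.1, acc.2.2)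
        else if PySem.Str.strIsalpha item then
          let alphabets := acc.2.1 ++ [item]
          let hl :=
            if pvStrIslower item then
              match acc.2.2 with
              | none => some item
              | some h => if h < item then some item else acc.2.2
            else acc.2.2
          (acc.1, alphabets, hl)
        else acc)
      (ns, as, hl)
    = (ns ++ l.filter PySem.Str.strIsdigit,
       as ++ l.filter PySem.Str.strIsalpha,
       ((l.filter PySem.Str.strIsalpha).filter pvStrIslower).foldl
         (fun acc x =>
           match acc with
           | none => some x
           | some m => if m < x then some x else some m) hl) := by
  induction l generalizing ns as hl with
  | nil => simp
  | cons x t ih =>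
    simp only [PySem.Str.strIsdigit, PySem.Str.strIsalpha] at ih ⊢
    rw [List.foldl_cons]
    by_cases hd : PySem.Chars.strIsdigit x.toList = true
    · have ha : PySem.Chars.strIsalpha x.toList = false := by
        by_contra hcon
        have h2 : PySem.Chars.strIsalpha x.toList = true := by
          revert hcon; cases PySem.Chars.strIsalpha x.toList <;> simp
        have := not_digit_of_alpha x.toList h2
        simp [hd] at this
      simp only [hd, reduceIte]
      rw [ih]
      simp [List.filter_cons, hd, ha]
    · by_cases ha : PySem.Chars.strIsalpha x.toList = true
      · simp only [hd, ha, reduceIte]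
        rw [ih]
        simp only [PySem.Str.strIsdigit, PySem.Str.strIsalpha, List.filter_cons, hd, ha,
          Bool.false_eq_true, reduceIte, List.append_assoc, List.singleton_append]
        congr 1
        congr 1
        by_cases hlow : pvStrIslower x = true
        · simp only [hlow, reduceIte]
          cases hl with
          | none => simp [List.foldl_cons]
          | some m => by_cases hlt : m.toList < x.toList <;> simp [List.foldl_cons, hlt]
        · simp only [hlow, Bool.false_eq_true, reduceIte]
      · simp only [hd, ha, reduceIte]
        rw [ih]
        simp [PySem.Str.strIsdigit, PySem.Str.strIsalpha, List.filter_cons, hd, ha]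

-- ===== VERDICT (by name: the statement is the Claim_ definition above) =====
theorem process_data_spec : Claim_equal_process_data := by
  intro data _
  show process_data data = process_data_alt data
  rw [process_data, process_data_alt, loop_inv]
  simp only [List.nil_append, PySem.List.max?]
  congr 2
  congr 1
  funext acc x
  cases acc with
  | none => rfl
  | some m => by_cases h : m < x <;> simp [h]
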